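-- pv_equiv track=rewrite | github.com/SIAndersson/AncientProteinScripts | analysis_pipeline.py | shorten_secondary_structure
-- ===== SOURCE A (Python) =====
-- def shorten_secondary_structure(ss):
--     """Remove consecutive duplicate characters from secondary structure string."""
--     shortened_ss = ""
--     prev_char = ""
--     for char in ss:
--         if char != prev_char:
--             shortened_ss += char
--         prev_char = char
--     return shortened_ss
-- ===== SOURCE B (Python) =====
-- def shorten_secondary_structure(ss):
--     """Remove consecutive duplicate characters from secondary structure string."""
--     # Divide and conquer: collapse each half recursively, then join the halves,
--     # dropping the right half's first character if it equals the left half's last.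
--     if len(ss) <= 1:
--         return ss
--     mid = len(ss) // 2
--     left = shorten_secondary_structure(ss[:mid])
--     right = shorten_secondary_structure(ss[mid:])
--     if right and left and right[0] == left[-1]:
--         right = right[1:]
--     return left + right
-- ===== Notes on version B (the rewrite author's own statement) =====
-- stated objective: alternative
-- what changed: Replaces the linear prev_char state machine with a divide-and-conquer recursion: collapse each half independently and merge, dropping the seam character when the two halves' boundary characters coincide.
import Mathlib
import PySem

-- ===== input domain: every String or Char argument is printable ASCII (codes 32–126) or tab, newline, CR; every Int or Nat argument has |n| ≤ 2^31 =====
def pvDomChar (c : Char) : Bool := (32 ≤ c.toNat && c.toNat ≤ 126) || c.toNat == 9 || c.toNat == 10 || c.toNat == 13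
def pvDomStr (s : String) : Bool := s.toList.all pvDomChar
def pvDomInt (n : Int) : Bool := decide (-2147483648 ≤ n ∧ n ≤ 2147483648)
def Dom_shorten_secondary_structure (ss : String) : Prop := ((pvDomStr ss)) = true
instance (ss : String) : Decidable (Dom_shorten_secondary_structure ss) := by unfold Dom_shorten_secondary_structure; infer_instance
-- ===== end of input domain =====

-- B replaces A's linear prev_char state machine with a divide-and-conquer recursion
-- (collapse each half, merge with a seam check); same result, stated as an alternative.

-- ===== PORT A =====
-- state: (shortened_ss, prev_char), both Python strings modelled as List Char
-- (prev_char starts as "" = [], then holds the one-character string [c]).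
def shorten_secondary_structure (ss : String) : String :=
  let r := ss.toList.foldl
    (fun (st : List Char × List Char) c =>
      if [c] ≠ st.2 then (st.1 ++ [c], [c]) else (st.1, [c]))
    ([], [])
  String.mk r.1

-- ===== PORT B =====
-- Source B's recursion, on List Char: halves via take/drop, seam check via
-- 'right nonempty ∧ left nonempty ∧ right[0] = left[-1]' (the match below).
def pvDC (xs : List Char) : List Char :=
  if h : xs.length ≤ 1 then xs
  else
    let mid := xs.length / 2
    let left := pvDC (xs.take mid)
    let right := pvDC (xs.drop mid)
    let right2 :=
      match right, left.getLast? with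
      | c :: rs, some l => if c = l then rs else c :: rs
      | r, _ => r
    left ++ right2
termination_by xs.length
decreasing_by
  · simp only [List.length_take]; omega
  · simp only [List.length_drop]; omega

def shorten_secondary_structure_alt (ss : String) : String :=
  String.mk (pvDC ss.toList)

-- ===== PRECONDITION & SPEC =====
def Spec_shorten_secondary_structure (ss : String) (out : String) : Prop := out = shorten_secondary_structure_alt ss
instance (ss : String) (out : String) : Decidable (Spec_shorten_secondary_structure ss out) := by unfold Spec_shorten_secondary_structure; infer_instance

-- ===== CLAIM (what is proved, stated in full; the proofs are below) =====
def Claim_equal_shorten_secondary_structure : Prop := ∀ (ss : String), Dom_shorten_secondary_structure ss → Spec_shorten_secondary_structure ss (shorten_secondary_structure ss)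

-- ===== LEMMAS AND PROOFS =====

-- Canonical collapse, split as head + tail-processor 'pvRest p t'
-- (= the collapsed tail of p::t, with p the previous character).
def pvRest (p : Char) : List Char → List Char
  | [] => []
  | c :: t => if c = p then pvRest c t else c :: pvRest c t

def pvCollapse : List Char → List Char
  | [] => []
  | a :: t => a :: pvRest a t

-- A's loop body.
def pvStepA (st : List Char × List Char) (c : Char) : List Char × List Char :=
  if [c] ≠ st.2 then (st.1 ++ [c], [c]) else (st.1, [c])

theorem foldA_rest (t : List Char) : ∀ (acc : List Char) (p : Char),
    (t.foldl pvStepA (acc, [p])).1 = acc ++ pvRest p t := by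
  induction t with
  | nil => simp [pvRest]
  | cons c t ih =>
      intro acc p
      simp only [List.foldl_cons, pvStepA, pvRest]
      by_cases h : c = p
      · subst h; simp [ih]
      · have hne : [c] ≠ [p] := by simp [h]
        simp [hne, h, ih]

theorem A_eq_collapse (ss : String) :
    shorten_secondary_structure ss = String.mk (pvCollapse ss.toList) := by
  unfold shorten_secondary_structure
  cases hxs : ss.toList with
  | nil => simp [pvCollapse]
  | cons c t =>
      have hstep : (fun (st : List Char × List Char) c =>
          if [c] ≠ st.2 then (st.1 ++ [c], [c]) else (st.1, [c])) = pvStepA := rfl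
      simp only [List.foldl_cons, hstep]
      have h1 : pvStepA ([], []) c = ([c], [c]) := by simp [pvStepA]
      rw [h1, foldA_rest t [c] c]
      simp [pvCollapse]

theorem rest_getLast? (t : List Char) : ∀ p : Char,
    (p :: pvRest p t).getLast? = (p :: t).getLast? := by
  induction t with
  | nil => intro p; rfl
  | cons c t ih =>
      intro p
      simp only [pvRest]
      by_cases h : c = p
      · subst h
        simp only [List.getLast?_cons_cons]
        exact ih c
      · simp only [h, if_false]
        simp only [List.getLast?_cons_cons]
        exact ih c

theorem rest_append (xt : List Char) : ∀ (p c : Char) (yt : List Char),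
    pvRest p (xt ++ c :: yt) =
      pvRest p xt ++ (if some c = (p :: xt).getLast? then pvRest c yt else c :: pvRest c yt) := by
  induction xt with
  | nil =>
      intro p c yt
      simp only [List.nil_append, pvRest, List.getLast?_singleton]
      by_cases h : c = p
      · simp [h]
      · have : ¬ (some c = some p) := by simp [h]
        simp [h, this]
  | cons x xt ih =>
      intro p c yt
      simp only [List.cons_append, pvRest]
      simp only [List.getLast?_cons_cons]
      by_cases h : x = p
      · simp only [h, if_pos rfl]
        exact ih p c yt
      · simp only [h, if_neg h]
        rw [ih x c yt]
        simp

theorem collapse_append (xs ys : List Char) (hx : xs ≠ []) (hy : ys ≠ []) :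
    pvCollapse (xs ++ ys) =
      pvCollapse xs ++
        (match pvCollapse ys, (pvCollapse xs).getLast? with
          | c :: rs, some l => if c = l then rs else c :: rs
          | r, _ => r) := by
  obtain ⟨a, xt, rfl⟩ := List.exists_cons_of_ne_nil hx
  obtain ⟨c, yt, rfl⟩ := List.exists_cons_of_ne_nil hy
  simp only [pvCollapse, List.cons_append]
  rw [rest_append xt a c yt, rest_getLast? xt a]
  cases hl : (a :: xt).getLast? with
  | none => simp at hl
  | some l =>
  by_cases h : c = l
  · simp [h]
  · have : ¬ (some c = some l) := by simp [h]
    simp [h, this]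

theorem pvDC_eq_collapse : ∀ (n : ℕ) (xs : List Char), xs.length ≤ n → pvDC xs = pvCollapse xs := by
  intro n
  induction n with
  | zero =>
      intro xs h
      have : xs = [] := List.eq_nil_of_length_eq_zero (Nat.le_zero.mp h)
      subst this; simp [pvDC, pvCollapse]
  | succ n ih =>
      intro xs hlen
      by_cases h : xs.length ≤ 1
      · rw [pvDC, dif_pos h]
        cases xs with
        | nil => rfl
        | cons a t =>
            cases t with
            | nil => rfl
            | cons b t => simp at h
      · rw [pvDC, dif_neg h]
        push_neg at h
        have hmid1 : 1 ≤ xs.length / 2 := by omega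
        have hmid2 : xs.length / 2 < xs.length := by omega
        have htake : (xs.take (xs.length / 2)).length ≤ n := by
          simp only [List.length_take]; omega
        have hdrop : (xs.drop (xs.length / 2)).length ≤ n := by
          simp only [List.length_drop]; omega
        have htne : xs.take (xs.length / 2) ≠ [] := by
          intro hc
          have := congrArg List.length hc
          simp only [List.length_take, List.length_nil] at this
          omega
        have hdne : xs.drop (xs.length / 2) ≠ [] := by
          intro hc
          have := congrArg List.length hc
          simp only [List.length_drop, List.length_nil] at this
          omega
        simp only [ih _ htake, ih _ hdrop]
        have := collapse_append (xs.take (xs.length / 2)) (xs.drop (xs.length / 2)) htne hdne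
        rw [List.take_append_drop] at this
        rw [this]

-- ===== VERDICT (by name: the statement is the Claim_ definition above) =====
theorem shorten_secondary_structure_spec : Claim_equal_shorten_secondary_structure := by
  intro ss _
  unfold Spec_shorten_secondary_structure shorten_secondary_structure_alt
  rw [A_eq_collapse, pvDC_eq_collapse ss.toList.length ss.toList le_rfl]
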